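-- pv_equiv track=rewrite | github.com/Yarin78/yal | python/yal/util.py | replace_wildcards
-- ===== SOURCE A (Python) =====
-- from typing import Any, List, Optional, Tuple, TypeVar, Union
--
-- def replace_wildcards(pattern: str, wildcard: str, replacements: List[str]):
--     '''
--     Generates all possible replacement of a specific wildcard string
--     in a pattern, by replacing them with any of the values in replacements.
--     '''
--
--     def _generate_rec(cur: str, ix: int):
--         if ix == len(pattern):
--             yield cur
--         else:
--             if pattern[ix] != wildcard:
--                 yield from _generate_rec(cur + pattern[ix], ix+1)
--             else:
--                 for repl in replacements:
--                     yield from _generate_rec(cur + repl, ix+1)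
--
--     yield from _generate_rec("", 0)
-- ===== SOURCE B (Python) =====
-- def replace_wildcards(pattern, wildcard, replacements):
--     '''
--     Generates all possible replacement of a specific wildcard string
--     in a pattern, by replacing them with any of the values in replacements.
--     '''
--     # Split the pattern into fixed segments at each wildcard character,
--     # then expand slots left-to-right over the replacement choices.
--     segments = [""]
--     for ch in pattern:
--         if ch == wildcard:
--             segments.append("")
--         else:
--             segments[-1] += ch
--     results = [segments[0]]
--     for seg in segments[1:]:
--         results = [r + repl + seg for r in results for repl in replacements]
--     yield from results
-- ===== Notes on version B (the rewrite author's own statement) =====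
-- stated objective: faster
-- what changed: Replaces A's per-character recursive generator (which rebuilds prefixes via incremental string concatenation and a recursive call at every character) with a single scan that splits the pattern into fixed segments at each wildcard character, followed by a left-to-right Cartesian-product expansion over the replacement choices.
import Mathlib
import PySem

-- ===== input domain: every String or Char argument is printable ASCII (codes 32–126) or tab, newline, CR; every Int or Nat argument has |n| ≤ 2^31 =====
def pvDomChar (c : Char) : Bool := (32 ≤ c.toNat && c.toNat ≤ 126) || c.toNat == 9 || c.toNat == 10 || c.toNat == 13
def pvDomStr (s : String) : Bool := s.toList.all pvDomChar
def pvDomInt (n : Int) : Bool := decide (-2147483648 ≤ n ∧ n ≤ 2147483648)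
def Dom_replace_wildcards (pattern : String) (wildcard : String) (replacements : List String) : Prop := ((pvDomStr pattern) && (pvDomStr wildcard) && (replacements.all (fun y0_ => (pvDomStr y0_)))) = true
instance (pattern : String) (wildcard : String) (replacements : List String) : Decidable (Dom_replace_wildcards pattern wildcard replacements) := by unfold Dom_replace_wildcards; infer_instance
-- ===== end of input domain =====

-- B replaces A's per-character recursion by a segment split at each wildcard
-- character followed by a left-to-right Cartesian-product expansion (objective: alternative).
-- Both functions are Python generators; the equivalence is about the yielded sequence (as a list).

-- ===== PORT A =====
-- _generate_rec(cur, ix): structural recursion on the remaining characters of pattern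
def pvGenRec (wildcard : String) (replacements : List String) : List Char → String → List String
  | [], cur => [cur]
  | c :: rest, cur =>
    if String.ofList [c] ≠ wildcard then
      pvGenRec wildcard replacements rest (cur ++ String.ofList [c])
    else
      replacements.flatMap (fun repl => pvGenRec wildcard replacements rest (cur ++ repl))

def replace_wildcards (pattern : String) (wildcard : String) (replacements : List String) : List String :=
  pvGenRec wildcard replacements pattern.toList ""

-- ===== PORT B =====
-- the segment loop: state = (finished segments, current segment) (Python: segments list, its last element)
def pvSegStep (wildcard : String) (st : List String × String) (c : Char) : List String × String :=
  if String.ofList [c] = wildcard then (st.1 ++ [st.2], "") else (st.1, st.2 ++ String.ofList [c])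

-- the product loop body: results = [r + repl + seg for r in results for repl in replacements]
def pvProdStep (replacements : List String) (results : List String) (seg : String) : List String :=
  results.flatMap (fun r => replacements.map (fun repl => r ++ repl ++ seg))

def replace_wildcards_alt (pattern : String) (wildcard : String) (replacements : List String) : List String :=
  let st := pattern.toList.foldl (pvSegStep wildcard) ([], "")
  let segments := st.1 ++ [st.2]
  match segments with
  | [] => []   -- unreachable: segments is nonempty
  | s0 :: rest => rest.foldl (pvProdStep replacements) [s0]

-- ===== PRECONDITION & SPEC =====
def Spec_replace_wildcards (pattern : String) (wildcard : String) (replacements : List String) (out : List String) : Prop := out = replace_wildcards_alt pattern wildcard replacements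
instance (pattern : String) (wildcard : String) (replacements : List String) (out : List String) : Decidable (Spec_replace_wildcards pattern wildcard replacements out) := by unfold Spec_replace_wildcards; infer_instance

-- ===== CLAIM (what is proved, stated in full; the proofs are below) =====
def Claim_equal_replace_wildcards : Prop := ∀ (pattern : String) (wildcard : String) (replacements : List String), Dom_replace_wildcards pattern wildcard replacements → Spec_replace_wildcards pattern wildcard replacements (replace_wildcards pattern wildcard replacements)

-- ===== LEMMAS AND PROOFS =====

-- proof-only: recursive segment splitter, and prepending onto the first segment
def pvSplit (wildcard : String) : List Char → List String
  | [] => [""]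
  | c :: rest =>
    if String.ofList [c] = wildcard then "" :: pvSplit wildcard rest
    else match pvSplit wildcard rest with
      | [] => [String.ofList [c]]
      | s :: ss => (String.ofList [c] ++ s) :: ss

def pvPre (p : String) : List String → List String
  | [] => [p]
  | s :: ss => (p ++ s) :: ss

theorem pvSplit_ne_nil (wildcard : String) (cs : List Char) : pvSplit wildcard cs ≠ [] := by
  induction cs with
  | nil => simp [pvSplit]
  | cons c rest ih =>
    simp only [pvSplit]
    split
    · simp
    · cases h : pvSplit wildcard rest <;> simp

-- the segment fold computes pvSplit (with the pending segment prefixed)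
theorem pvSegStep_foldl (wildcard : String) (cs : List Char) :
    ∀ (done : List String) (cur : String),
    (cs.foldl (pvSegStep wildcard) (done, cur)).1 ++ [(cs.foldl (pvSegStep wildcard) (done, cur)).2]
      = done ++ pvPre cur (pvSplit wildcard cs) := by
  induction cs with
  | nil => intro done cur; simp [pvSplit, pvPre]
  | cons c rest ih =>
    intro done cur
    simp only [List.foldl_cons, pvSegStep]
    by_cases h : String.ofList [c] = wildcard
    · rw [if_pos h, ih]
      simp only [pvSplit, if_pos h]
      cases hs : pvSplit wildcard rest with
      | nil => exact absurd hs (pvSplit_ne_nil wildcard rest)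
      | cons s ss => simp [pvPre, String.append_empty, List.append_assoc]
    · rw [if_neg h, ih]
      simp only [pvSplit, if_neg h]
      cases hs : pvSplit wildcard rest with
      | nil => exact absurd hs (pvSplit_ne_nil wildcard rest)
      | cons s ss => simp [pvPre, String.append_assoc]

-- the product fold over segments, with a general initial result list
theorem pvProd_foldl_init (replacements : List String) (segs : List String) :
    ∀ (init : List String),
    segs.foldl (pvProdStep replacements) init
      = init.flatMap (fun r => (segs.foldl (pvProdStep replacements) [""]).map (fun t => r ++ t)) := by
  induction segs with
  | nil =>
    intro init
    simp [String.append_empty]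
  | cons seg rest ih =>
    intro init
    simp only [List.foldl_cons]
    rw [ih (pvProdStep replacements init seg), ih (pvProdStep replacements [""] seg)]
    simp [pvProdStep, List.flatMap_assoc, List.map_flatMap, List.flatMap_map, List.map_map,
      Function.comp_def, String.append_assoc, String.empty_append]

-- common specification, compositional in the pattern
def pvSpecGen (wildcard : String) (replacements : List String) : List Char → List String
  | [] => [""]
  | c :: rest =>
    if String.ofList [c] = wildcard then
      replacements.flatMap (fun repl => (pvSpecGen wildcard replacements rest).map (fun t => repl ++ t))
    else (pvSpecGen wildcard replacements rest).map (fun t => String.ofList [c] ++ t)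

-- A's recursion equals cur ++ the specification
theorem pvGenRec_eq_spec (wildcard : String) (replacements : List String) (cs : List Char) :
    ∀ (cur : String),
    pvGenRec wildcard replacements cs cur
      = (pvSpecGen wildcard replacements cs).map (fun t => cur ++ t) := by
  induction cs with
  | nil => intro cur; simp [pvGenRec, pvSpecGen, String.append_empty]
  | cons c rest ih =>
    intro cur
    simp only [pvGenRec, pvSpecGen]
    by_cases h : String.ofList [c] = wildcard
    · rw [if_neg (by simpa using h), if_pos h]
      simp only [List.map_flatMap]
      have : ∀ repl : String,
          pvGenRec wildcard replacements rest (cur ++ repl)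
            = ((pvSpecGen wildcard replacements rest).map (fun t => repl ++ t)).map (fun t => cur ++ t) := by
        intro repl
        rw [ih]
        simp [List.map_map, Function.comp, String.append_assoc]
      simp only [this]
    · rw [if_pos (by simpa using h), if_neg h]
      rw [ih]
      simp [List.map_map, Function.comp, String.append_assoc]

-- B's result on the split segments equals the specification
theorem pvB_eq_spec (wildcard : String) (replacements : List String) (cs : List Char) :
    (match pvSplit wildcard cs with
      | [] => ([] : List String)
      | s0 :: rest => rest.foldl (pvProdStep replacements) [s0])
      = pvSpecGen wildcard replacements cs := by
  induction cs with
  | nil => simp [pvSplit, pvSpecGen]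
  | cons c rest ih =>
    simp only [pvSplit, pvSpecGen]
    by_cases h : String.ofList [c] = wildcard
    · rw [if_pos h, if_pos h]
      cases hs : pvSplit wildcard rest with
      | nil => exact absurd hs (pvSplit_ne_nil wildcard rest)
      | cons s ss =>
        rw [hs] at ih
        simp only at ih
        rw [← ih]
        simp only [List.foldl_cons]
        rw [pvProd_foldl_init replacements ss (pvProdStep replacements [""] s),
            pvProd_foldl_init replacements ss [s]]
        simp [pvProdStep, List.flatMap_map, List.map_map,
          Function.comp_def, String.append_assoc, String.empty_append]
    · rw [if_neg h, if_neg h]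
      cases hs : pvSplit wildcard rest with
      | nil => exact absurd hs (pvSplit_ne_nil wildcard rest)
      | cons s ss =>
        rw [hs] at ih
        simp only at ih
        rw [← ih]
        show List.foldl (pvProdStep replacements) [String.ofList [c] ++ s] ss
            = List.map (fun t => String.ofList [c] ++ t) (List.foldl (pvProdStep replacements) [s] ss)
        rw [pvProd_foldl_init replacements ss [String.ofList [c] ++ s],
            pvProd_foldl_init replacements ss [s]]
        simp [List.map_map, Function.comp_def, String.append_assoc]

-- ===== VERDICT (by name: the statement is the Claim_ definition above) =====
theorem replace_wildcards_spec : Claim_equal_replace_wildcards := by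
  intro pattern wildcard replacements _
  unfold Spec_replace_wildcards replace_wildcards replace_wildcards_alt
  have hseg := pvSegStep_foldl wildcard pattern.toList [] ""
  simp only [List.nil_append] at hseg
  have hsplit : (pattern.toList.foldl (pvSegStep wildcard) ([], "")).1
      ++ [(pattern.toList.foldl (pvSegStep wildcard) ([], "")).2]
      = pvSplit wildcard pattern.toList := by
    rw [hseg]
    cases hs : pvSplit wildcard pattern.toList with
    | nil => exact absurd hs (pvSplit_ne_nil wildcard pattern.toList)
    | cons s ss => simp [pvPre, String.empty_append]
  rw [pvGenRec_eq_spec]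
  simp only [hsplit]
  rw [pvB_eq_spec]
  simp [String.empty_append]
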